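-- pv_equiv track=rewrite | github.com/ibraheemmryyian/jarvis | agents/utils/escalation.py | _check_destructive_action
-- ===== SOURCE A (Python) =====
-- from typing import Dict, List, Optional, Callable
--
-- def _check_destructive_action(context: Dict) -> bool:
--     """Check if action is destructive and needs confirmation."""
--     action = context.get("action", "").lower()
--
--     destructive_keywords = [
--         "delete", "remove", "drop", "truncate", "destroy",
--         "wipe", "clear all", "reset", "overwrite", "replace all"
--     ]
--
--     for keyword in destructive_keywords:
--         if keyword in action:
--             return True
--
--     return False
-- ===== SOURCE B (Python) =====
-- def _check_destructive_action(context) -> bool: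
--     """Check if action is destructive and needs confirmation."""
--     action = context.get("action", "").lower()
--     keywords = ["delete", "remove", "drop", "truncate", "destroy",
--                 "wipe", "clear all", "reset", "overwrite", "replace all"]
--     # Single left-to-right pass: keep a worklist of keyword suffixes still being
--     # matched (an NFA-state simulation), instead of one substring scan per keyword.
--     active = []
--     for ch in action:
--         nxt = [t[1:] for t in keywords + active if t[:1] == ch]
--         if "" in nxt:
--             return True
--         active = nxt
--     return False
-- ===== Notes on version B (the rewrite author's own statement) =====
-- stated objective: alternative
-- what changed: Instead of ten independent substring scans, B makes one left-to-right pass over the action string maintaining a worklist of in-progress partial keyword matches (keyword suffixes still matchable), advancing or spawning states at each character and reporting True when a state completes.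
import Mathlib
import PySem

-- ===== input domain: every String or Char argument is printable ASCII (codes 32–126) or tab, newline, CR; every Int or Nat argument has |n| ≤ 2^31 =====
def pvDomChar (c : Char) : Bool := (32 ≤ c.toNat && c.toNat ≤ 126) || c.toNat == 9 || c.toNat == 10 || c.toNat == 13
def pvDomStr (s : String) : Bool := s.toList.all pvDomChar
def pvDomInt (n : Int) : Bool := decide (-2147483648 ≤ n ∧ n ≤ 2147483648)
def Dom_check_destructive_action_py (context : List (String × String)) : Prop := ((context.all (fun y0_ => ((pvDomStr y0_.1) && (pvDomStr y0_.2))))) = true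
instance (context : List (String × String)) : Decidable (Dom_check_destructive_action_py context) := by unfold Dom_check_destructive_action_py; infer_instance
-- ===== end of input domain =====

-- B makes one pass over the string with a worklist of partial keyword matches instead of A's per-keyword substring scans (alternative decomposition, same cost class).

-- ===== PORT A =====
def pvKeywordsA : List String :=
  ["delete", "remove", "drop", "truncate", "destroy",
   "wipe", "clear all", "reset", "overwrite", "replace all"]

-- the 'for keyword in destructive_keywords: if keyword in action: return True' loop
def pvLoopA : List String → String → Bool
  | [], _ => false
  | kw :: rest, action =>
    if PySem.Str.isIn kw action then true else pvLoopA rest action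

def check_destructive_action_py (context : List (String × String)) : Bool :=
  let action := PySem.Str.lower (PySem.Dict.getD (PySem.Dict.mk context) "action" "")
  pvLoopA pvKeywordsA action

-- ===== PORT B =====
-- Source B's keyword list, as lists of characters (states are string remainders in Python)
def pvKeyLists : List (List Char) :=
  (["delete", "remove", "drop", "truncate", "destroy",
    "wipe", "clear all", "reset", "overwrite", "replace all"] : List String).map String.toList

-- Source B's loop body: nxt = [t[1:] for t in keywords + active if t[:1] == ch]
def pvStepB (active : List (List Char)) (c : Char) : List (List Char) :=
  ((pvKeyLists ++ active).filter (fun t => t.head? == some c)).map List.tail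

-- Source B's loop: for each character, advance/spawn the active partial matches;
-- 'if "" in nxt: return True' else continue with nxt
def pvRunB : List (List Char) → List Char → Bool
  | _, [] => false
  | active, c :: cs =>
    if (pvStepB active c).contains ([] : List Char) then true
    else pvRunB (pvStepB active c) cs

def check_destructive_action_py_alt (context : List (String × String)) : Bool :=
  let action := PySem.Str.lower (PySem.Dict.getD (PySem.Dict.mk context) "action" "")
  pvRunB [] action.toList

-- ===== PRECONDITION & SPEC =====
def Spec_check_destructive_action_py (context : List (String × String)) (out : Bool) : Prop := out = check_destructive_action_py_alt context
instance (context : List (String × String)) (out : Bool) : Decidable (Spec_check_destructive_action_py context out) := by unfold Spec_check_destructive_action_py; infer_instance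

-- ===== CLAIM =====
def Claim_equal_check_destructive_action_py : Prop := ∀ (context : List (String × String)), Dom_check_destructive_action_py context → Spec_check_destructive_action_py context (check_destructive_action_py context)

-- ===== LEMMAS AND PROOFS =====

-- A's early-return loop is List.any of the substring tests
theorem pvLoopA_eq_any (K : List String) (action : String) :
    pvLoopA K action = K.any (fun kw => PySem.Str.isIn kw action) := by
  induction K with
  | nil => rfl
  | cons kw rest ih =>
    rw [pvLoopA]
    split_ifs with h <;> rw [PySem.Str.isIn_eq] at h <;> simp [h, ih]

-- membership in one step of B's pass
theorem mem_pvStepB (active : List (List Char)) (c : Char) (t' : List Char) :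
    t' ∈ pvStepB active c ↔ (c :: t') ∈ pvKeyLists ++ active := by
  unfold pvStepB
  simp only [List.mem_map, List.mem_filter, beq_iff_eq]
  constructor
  · rintro ⟨t, ⟨ht, hhead⟩, htail⟩
    cases t with
    | nil => simp at hhead
    | cons a u =>
      simp only [List.head?_cons, Option.some.injEq] at hhead
      simp only [List.tail_cons] at htail
      subst hhead; subst htail; exact ht
  · intro h; exact ⟨c :: t', ⟨h, by simp⟩, rfl⟩

-- invariant of B's pass: it succeeds iff some active remainder is a prefix of the
-- rest, or some keyword occurs as an infix of the rest
theorem pvRunB_iff (s : List Char) : ∀ (active : List (List Char)),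
    pvRunB active s = true ↔
      (∃ t ∈ active, t ≠ [] ∧ t <+: s) ∨ (∃ kw ∈ pvKeyLists, kw ≠ [] ∧ kw <:+: s) := by
  induction s with
  | nil =>
    intro active
    simp [pvRunB, List.prefix_nil, List.infix_nil]
  | cons c cs ih =>
    intro active
    rw [pvRunB]
    by_cases hmem : ([] : List Char) ∈ pvStepB active c
    · rw [if_pos (by simpa using hmem)]
      have h0 : (c :: ([] : List Char)) ∈ pvKeyLists ++ active :=
        (mem_pvStepB active c []).mp hmem
      refine iff_of_true rfl ?_
      rcases List.mem_append.mp h0 with hK | hA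
      · exact Or.inr ⟨[c], hK, by simp, (by simp : [c] <+: c :: cs).isInfix⟩
      · exact Or.inl ⟨[c], hA, by simp, by simp⟩
    · rw [if_neg (by simpa using hmem), ih]
      constructor
      · rintro (⟨t', ht', _, hpre⟩ | ⟨kw, hkw, hne, hinf⟩)
        · have h0 := (mem_pvStepB active c t').mp ht'
          rcases List.mem_append.mp h0 with hK | hA
          · exact Or.inr ⟨c :: t', hK, by simp, (List.cons_prefix_cons.mpr ⟨rfl, hpre⟩).isInfix⟩
          · exact Or.inl ⟨c :: t', hA, by simp, List.cons_prefix_cons.mpr ⟨rfl, hpre⟩⟩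
        · exact Or.inr ⟨kw, hkw, hne, List.infix_cons_iff.mpr (Or.inr hinf)⟩
      · have step : ∀ t : List Char, t ∈ pvKeyLists ++ active → t <+: c :: cs → t ≠ [] →
            t.tail ∈ pvStepB active c ∧ t.tail ≠ [] ∧ t.tail <+: cs := by
          intro t htmem hpre hne
          cases t with
          | nil => exact absurd rfl hne
          | cons a u =>
            obtain ⟨hac, hupre⟩ := List.cons_prefix_cons.mp hpre
            rw [hac] at htmem
            have hm : u ∈ pvStepB active c := (mem_pvStepB active c u).mpr htmem
            refine ⟨hm, ?_, hupre⟩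
            intro hu; simp only [List.tail_cons] at hu; rw [hu] at hm; exact hmem hm
        rintro (⟨t, ht, hne, hpre⟩ | ⟨kw, hkw, hne, hinf⟩)
        · obtain ⟨hm, hn, hp⟩ := step t (List.mem_append.mpr (Or.inr ht)) hpre hne
          exact Or.inl ⟨t.tail, hm, hn, hp⟩
        · rcases List.infix_cons_iff.mp hinf with hpre | hinf'
          · obtain ⟨hm, hn, hp⟩ := step kw (List.mem_append.mpr (Or.inl hkw)) hpre hne
            exact Or.inl ⟨kw.tail, hm, hn, hp⟩
          · exact Or.inr ⟨kw, hkw, hne, hinf'⟩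

-- every keyword is nonempty
theorem pvKeyLists_ne_nil : ∀ kw ∈ pvKeyLists, kw ≠ [] := by decide

-- ===== VERDICT =====
theorem check_destructive_action_py_spec : Claim_equal_check_destructive_action_py := by
  intro context _
  unfold Spec_check_destructive_action_py
  unfold check_destructive_action_py check_destructive_action_py_alt
  rw [pvLoopA_eq_any, Bool.eq_iff_iff, pvRunB_iff]
  simp only [List.any_eq_true, PySem.Str.isIn_iff_infix, List.not_mem_nil, false_and, exists_false, false_or]
  constructor
  · rintro ⟨kw, hkw, hinf⟩
    refine ⟨kw.toList, ?_, ?_, hinf⟩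
    · exact List.mem_map.mpr ⟨kw, hkw, rfl⟩
    · exact pvKeyLists_ne_nil _ (List.mem_map.mpr ⟨kw, hkw, rfl⟩)
  · rintro ⟨kwl, hkwl, _, hinf⟩
    obtain ⟨kw, hkw, rfl⟩ := List.mem_map.mp hkwl
    exact ⟨kw, hkw, hinf⟩
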